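-- pv_equiv track=rewrite | github.com/h12567/FGMN | Implementation/code/tsfm/getInput.py | find
-- ===== SOURCE A (Python) =====
-- def find(num,max_atoms):
--     ls = []
--     idx = 0
--     for i in range(max_atoms - 1):
--         for j in range(i + 1, max_atoms):
--             ls.append([i, j])
--             idx += 1
--     return ls[num][0], ls[num][1]
-- ===== SOURCE B (Python) =====
-- def find(num, max_atoms):
--     # Arithmetic walk over the rows of the (i, j) pair enumeration: row i
--     # holds max_atoms - 1 - i pairs, so subtract row sizes instead of
--     # materialising the quadratic list.  O(max_atoms) time, O(1) space.
--     total = max_atoms * (max_atoms - 1) // 2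
--     n = num + total if num < 0 else num
--     if not 0 <= n < total:
--         raise IndexError("list index out of range")
--     i = 0
--     row = max_atoms - 1          # number of pairs whose first element is i
--     while row > 0 and n >= row:
--         n -= row
--         i += 1
--         row -= 1
--     return i, i + 1 + n
-- ===== Notes on version B (the rewrite author's own statement) =====
-- stated objective: faster
-- what changed: Instead of materialising the full quadratic list of pairs and indexing into it, B walks the row sizes arithmetically (subtracting max_atoms-1-i per row), using O(max_atoms) time and O(1) space.
import Mathlib
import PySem

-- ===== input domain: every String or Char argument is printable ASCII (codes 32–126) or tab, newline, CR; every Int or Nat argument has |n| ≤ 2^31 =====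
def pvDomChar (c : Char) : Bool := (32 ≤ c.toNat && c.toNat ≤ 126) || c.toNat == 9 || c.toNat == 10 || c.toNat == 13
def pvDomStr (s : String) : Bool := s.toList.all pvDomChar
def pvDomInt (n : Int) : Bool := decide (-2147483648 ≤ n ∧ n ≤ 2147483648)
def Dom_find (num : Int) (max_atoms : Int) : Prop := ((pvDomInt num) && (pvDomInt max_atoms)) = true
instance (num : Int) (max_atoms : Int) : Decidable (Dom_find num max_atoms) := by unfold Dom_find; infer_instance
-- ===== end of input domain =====

-- B walks the pair enumeration arithmetically (O(max_atoms)) instead of building A's quadratic list; equal on all in-range indices.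

-- ===== PORT A =====
-- A's dead counter `idx` (incremented, never read) is omitted.
def find (num : Int) (max_atoms : Int) : List Int :=
  let ls : List (List Int) :=
    (PySem.List.pyRange 0 (max_atoms - 1) 1).foldl (fun acc i =>
      (PySem.List.pyRange (i + 1) max_atoms 1).foldl (fun acc2 j =>
        acc2 ++ [[i, j]]) acc) []
  let p := (PySem.List.pyGet? ls num).getD []
  [(PySem.List.pyGet? p 0).getD 0, (PySem.List.pyGet? p 1).getD 0]

-- ===== PORT B =====
-- the while loop of Source B: state (n, i, row)
def findAltLoop (n : Int) (i : Int) (row : Int) : Int × Int :=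
  if h : 0 < row ∧ row ≤ n then findAltLoop (n - row) (i + 1) (row - 1)
  else (i, i + 1 + n)
termination_by row.toNat
decreasing_by omega

def find_alt (num : Int) (max_atoms : Int) : List Int :=
  let total := PySem.Int.floordiv (max_atoms * (max_atoms - 1)) 2
  let n := if num < 0 then num + total else num
  let p := findAltLoop n 0 (max_atoms - 1)
  [p.1, p.2]

-- ===== PRECONDITION & SPEC =====
-- Pre_ excludes exactly the inputs where A raises IndexError: max_atoms < 2 (empty pair
-- list) or num outside the Python index range [-total, total) of the list of
-- total = max_atoms*(max_atoms-1)/2 pairs (stated multiplied by 2 to stay division-free).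
def Pre_find (num : Int) (max_atoms : Int) : Prop :=
  2 ≤ max_atoms ∧ 0 ≤ 2 * num + max_atoms * (max_atoms - 1) ∧ 2 * num < max_atoms * (max_atoms - 1)
instance (num : Int) (max_atoms : Int) : Decidable (Pre_find num max_atoms) := by unfold Pre_find; infer_instance
def pvWitness_find : Int × Int := (3, 4)

def Spec_find (num : Int) (max_atoms : Int) (out : List Int) : Prop := out = find_alt num max_atoms
instance (num : Int) (max_atoms : Int) (out : List Int) : Decidable (Spec_find num max_atoms out) := by unfold Spec_find; infer_instance

-- ===== CLAIM (what is proved, stated in full; the proofs are below) =====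
def Claim_equal_find : Prop := ∀ (num : Int) (max_atoms : Int), Dom_find num max_atoms → Pre_find num max_atoms → Spec_find num max_atoms (find num max_atoms)

-- ===== LEMMAS AND PROOFS =====

-- proof-side view of A's list: rows i = a, a+1, …, a+k-1; row i holds pairs (i, j), i < j ≤ a+k
def pairRows (a : Int) (k : Nat) : List (List Int) :=
  (PySem.List.pyRange a (a + k) 1).flatMap (fun i =>
    (PySem.List.pyRange (i + 1) (a + k + 1) 1).map (fun j => [i, j]))

lemma pairRows_succ (a : Int) (k : Nat) :
    pairRows a (k + 1)
      = (PySem.List.pyRange (a + 1) (a + k + 2) 1).map (fun j => [a, j]) ++ pairRows (a + 1) k := by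
  unfold pairRows
  rw [PySem.List.pyRange_one_cons (by push_cast; omega)]
  rw [List.flatMap_cons]
  push_cast
  ring_nf

lemma length_pairRows (a : Int) (k : Nat) : (pairRows a k).length = k * (k + 1) / 2 := by
  induction k generalizing a with
  | zero => simp [pairRows, PySem.List.pyRange_one_eq_nil]
  | succ k ih =>
      rw [pairRows_succ, List.length_append, ih]
      rw [List.length_map, PySem.List.length_pyRange_one]
      have e : (k + 1) * (k + 1 + 1) = k * (k + 1) + 2 * (k + 1) := by ring
      omega

lemma ls_eq_pairRows (m : Int) (h : 2 ≤ m) :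
    (PySem.List.pyRange 0 (m - 1) 1).foldl (fun acc i =>
      (PySem.List.pyRange (i + 1) m 1).foldl (fun acc2 j => acc2 ++ [[i, j]]) acc) []
    = pairRows 0 (m - 1).toNat := by
  have h1 : ∀ (acc : List (List Int)) (i : Int),
      (PySem.List.pyRange (i + 1) m 1).foldl (fun acc2 j => acc2 ++ [[i, j]]) acc
        = acc ++ (PySem.List.pyRange (i + 1) m 1).map (fun j => [i, j]) := by
    intro acc i; exact PySem.List.foldl_append_singleton_eq_map _ _ _
  simp only [h1]
  rw [PySem.List.foldl_append_eq_flatMap]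
  unfold pairRows
  have h2 : (0 : Int) + ((m - 1).toNat : Int) = m - 1 := by omega
  rw [h2]
  have h3 : m - 1 + 1 = m := by ring
  rw [h3]
  simp

lemma get_pairRows_eq_loop (k : Nat) : ∀ (a n : Int), 0 ≤ n → 2 * n < k * (k + 1) →
    (pairRows a k)[n.toNat]? = some [(findAltLoop n a k).1, (findAltLoop n a k).2] := by
  induction k with
  | zero => intro a n h0 h1; omega
  | succ k ih =>
      intro a n h0 h1
      rw [pairRows_succ]
      rw [findAltLoop]
      by_cases hlt : n < (k : Int) + 1
      · -- index lands in the first row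
        have hrow : ¬ (0 < ((k : Nat) + 1 : Nat) ∧ ((k : Nat) + 1 : Nat) ≤ n) := by push_cast; omega
        rw [dif_neg (by push_cast at hrow ⊢; omega)]
        rw [List.getElem?_append_left (by
          rw [List.length_map, PySem.List.length_pyRange_one]; omega)]
        rw [List.getElem?_map]
        rw [PySem.List.getElem?_pyRange_one]
        rw [if_pos (by omega)]
        simp only [Option.map_some]
        rw [show ((n.toNat : Nat) : Int) = n from by omega]
      · -- index lands in the remaining rows
        rw [dif_pos (by push_cast; omega)]
        rw [List.getElem?_append_right (by
          rw [List.length_map, PySem.List.length_pyRange_one]; omega)]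
        have hlen : ((PySem.List.pyRange (a + 1) (a + ↑k + 2) 1).map (fun j => [a, j])).length = k + 1 := by
          rw [List.length_map, PySem.List.length_pyRange_one]; omega
        rw [hlen]
        have hidx : n.toNat - (k + 1) = (n - (↑k + 1)).toNat := by omega
        rw [hidx]
        have hexp : ((k : Int) + 1) * ((k : Int) + 1 + 1) = (k : Int) * ((k : Int) + 1) + 2 * ((k : Int) + 1) := by ring
        have := ih (a + 1) (n - (↑k + 1)) (by omega)
          (by push_cast at h1 ⊢; rw [hexp] at h1; omega)
        have harg : n - ((k : Int) + 1) = n - (↑(k + 1) : Int) := by push_cast; ring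
        rw [this]
        congr 2 <;> (push_cast; ring_nf)

-- ===== VERDICT (by name: the statement is the Claim_ definition above) =====
theorem find_spec : Claim_equal_find := by
  intro num m _ hpre
  obtain ⟨hm, hlo, hhi⟩ := hpre
  unfold Spec_find find find_alt
  dsimp only
  rw [ls_eq_pairRows m hm]
  set M : Nat := (m - 1).toNat with hM
  have hMm : (M : Int) = m - 1 := by omega
  have htot : PySem.Int.floordiv (m * (m - 1)) 2 = ((M * (M + 1) / 2 : Nat) : Int) := by
    have hprod : m * (m - 1) = ((M * (M + 1) : Nat) : Int) := by push_cast; rw [hMm]; ring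
    rw [hprod]
    exact_mod_cast PySem.Int.floordiv_natCast (M * (M + 1)) 2
  have hlen : (pairRows 0 M).length = M * (M + 1) / 2 := length_pairRows 0 M
  have hbound : 2 * (M * (M + 1) / 2) = M * (M + 1) := by
    have h2 : 2 ∣ M * (M + 1) := (Nat.even_mul_succ_self M).two_dvd
    omega
  have hcast : 2 * ((M * (M + 1) / 2 : Nat) : Int) = (M : Int) * (M + 1) := by
    exact_mod_cast congrArg (Nat.cast : Nat → Int) hbound
  -- the effective non-negative index
  set n : Int := if num < 0 then num + PySem.Int.floordiv (m * (m - 1)) 2 else num with hn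
  have hn0 : 0 ≤ n := by
    rw [hn]; split_ifs with hneg
    · rw [htot]
      have hMM : (M : Int) * (M + 1) = m * (m - 1) := by rw [hMm]; ring
      rw [hMM] at hcast
      omega
    · omega
  have hnlt : 2 * n < (M : Int) * (M + 1) := by
    have hMM : (M : Int) * (M + 1) = m * (m - 1) := by rw [hMm]; ring
    rw [hn, hMM]; split_ifs with hneg
    · rw [htot]
      have h3 := hcast
      rw [hMM] at h3
      omega
    · omega
  have hget : PySem.List.pyGet? (pairRows 0 M) num
      = some [(findAltLoop n 0 M).1, (findAltLoop n 0 M).2] := by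
    have hmain := get_pairRows_eq_loop M 0 n hn0 (by exact_mod_cast hnlt)
    by_cases hneg : num < 0
    · have hk : num = -(((-num).toNat : Nat) : Int) := by omega
      rw [hk, PySem.List.pyGet?_neg_natCast _ _ (by omega) (by rw [hlen]; omega)]
      rw [hlen]
      have : M * (M + 1) / 2 - (-num).toNat = n.toNat := by
        rw [hn, if_pos hneg, htot]
        have hMM : (M : Int) * (M + 1) = m * (m - 1) := by rw [hMm]; ring
        rw [hMM] at hcast
        omega
      rw [this]; exact hmain
    · rw [PySem.List.pyGet?_of_nonneg (pairRows 0 M) (show (0:Int) ≤ num by omega)]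
      have : num = n := by rw [hn, if_neg hneg]
      rw [this]; exact hmain
  rw [hget]
  simp only [Option.getD_some]
  have g0 : PySem.List.pyGet? [(findAltLoop n 0 M).1, (findAltLoop n 0 M).2] 0
      = some (findAltLoop n 0 M).1 := PySem.List.pyGet?_zero_cons _ _
  have g1 : PySem.List.pyGet? [(findAltLoop n 0 M).1, (findAltLoop n 0 M).2] 1
      = some (findAltLoop n 0 M).2 := by simp
  rw [g0, g1, hMm]
  simp
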